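-- pv_equiv track=rewrite | github.com/haolunc/ARC-RL | reference_solutions/solutions/b190f7f5.py | transform
-- ===== SOURCE A (Python) =====
-- def transform(grid):
--
--     h = len(grid)
--     w = len(grid[0])
--
--     if w == 2 * h:
--         n = h
--         left  = [row[:n] for row in grid]
--         right = [row[n:] for row in grid]
--
--         if any(8 in row for row in left):
--             mask_half = left
--             src_half  = right
--         else:
--             mask_half = right
--             src_half  = left
--     elif h == 2 * w:
--         n = w
--         top    = [grid[i] for i in range(n)]
--         bottom = [grid[i] for i in range(n, 2 * n)]
--         if any(8 in row for row in top):
--             mask_half = top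
--             src_half  = bottom
--         else:
--             mask_half = bottom
--             src_half  = top
--     else:
--         raise ValueError("Input size does not match the expected n x 2n or 2n x n pattern.")
--
--     mask = [[1 if mask_half[i][j] == 8 else 0 for j in range(n)] for i in range(n)]
--
--     out_size = n * n
--     out = [[0 for _ in range(out_size)] for _ in range(out_size)]
--
--     for i in range(n):
--         for j in range(n):
--             val = src_half[i][j]
--             if val == 0:
--                 continue
--             for di in range(n):
--                 for dj in range(n):
--                     if mask[di][dj]:
--                         out[i * n + di][j * n + dj] = val
--     return out
-- ===== SOURCE B (Python) =====
-- def transform(grid):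
--     h = len(grid)
--     w = len(grid[0])
--
--     if w == 2 * h:
--         n = h
--         first = [row[:n] for row in grid]
--         second = [row[n:] for row in grid]
--     elif h == 2 * w:
--         n = w
--         first = grid[:n]
--         second = grid[n:2 * n]
--     else:
--         raise ValueError("Input size does not match the expected n x 2n or 2n x n pattern.")
--
--     mask, src = (first, second) if any(8 in row for row in first) else (second, first)
--
--     # Kronecker product src (x) indicator(mask): scale whole 0/1 copies of the mask by
--     # each source value and stitch the scaled copies together block-row by block-row.
--     bits = [[1 if c == 8 else 0 for c in row[:n]] for row in mask]
--
--     out = []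
--     for srow in src:
--         scaled = [[[v * b for b in brow] for brow in bits] for v in srow[:n]]
--         for di in range(n):
--             row = []
--             for blk in scaled:
--                 row += blk[di]
--             out.append(row)
--     return out
-- ===== Notes on version B (the rewrite author's own statement) =====
-- stated objective: alternative
-- what changed: B computes the result as the Kronecker product src (x) indicator(mask): it builds one whole 0/1 copy of the mask scaled by each source value (multiplication replaces A's per-cell mask test, zero-skip continue and preallocated zero matrix) and stitches these scaled mask copies together block-row by block-row instead of scatter-writing cells into a mutated output.
import Mathlib
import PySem

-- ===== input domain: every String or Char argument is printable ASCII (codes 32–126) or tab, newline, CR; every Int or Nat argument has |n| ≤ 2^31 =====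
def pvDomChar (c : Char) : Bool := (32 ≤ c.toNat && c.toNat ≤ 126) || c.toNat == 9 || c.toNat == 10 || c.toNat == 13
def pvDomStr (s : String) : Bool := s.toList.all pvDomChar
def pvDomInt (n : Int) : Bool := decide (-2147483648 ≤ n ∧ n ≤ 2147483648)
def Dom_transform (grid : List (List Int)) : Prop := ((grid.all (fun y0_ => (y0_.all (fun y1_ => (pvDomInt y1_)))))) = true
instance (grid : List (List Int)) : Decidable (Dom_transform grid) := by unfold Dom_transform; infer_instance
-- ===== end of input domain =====

-- B computes the Kronecker product src ⊗ indicator(mask): whole 0/1 copies of the mask are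
-- scaled by each source value (multiplication instead of A's per-cell mask test, continue
-- zero-skip and preallocated mutated zero matrix) and stitched block-row by block-row
-- (objective: alternative).

-- ===== PORT A =====
-- grid[i] resp. grid[i][j]; all uses below are in range under Pre_transform, so getD is exact there
def pvIdx1 (g : List (List Int)) (i : Nat) : List Int := g.getD i []
def pvIdx2 (g : List (List Int)) (i j : Nat) : Int := (g.getD i []).getD j 0

-- mask = [[1 if mask_half[i][j] == 8 else 0 for j in range(n)] for i in range(n)]
def pvMask (mh : List (List Int)) (n : Nat) : List (List Int) :=
  (List.range n).map (fun i => (List.range n).map (fun j => if pvIdx2 mh i j = 8 then (1 : Int) else 0))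

-- the common tail of A after mask_half/src_half are chosen: zero matrix + quadruple scatter-write loop
def pvALoops (mh sh : List (List Int)) (n : Nat) : List (List Int) :=
  let mask := pvMask mh n
  let out0 : List (List Int) :=
    (List.range (n * n)).map (fun _ => (List.range (n * n)).map (fun _ => (0 : Int)))
  (List.range n).foldl (fun out i =>
    (List.range n).foldl (fun out j =>
      let val := pvIdx2 sh i j
      if val = 0 then out
      else
        (List.range n).foldl (fun out di =>
          (List.range n).foldl (fun out dj =>
            if pvIdx2 mask di dj ≠ 0 then
              out.modify (i * n + di) (fun row => row.set (j * n + dj) val)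
            else out) out) out) out) out0

def transform (grid : List (List Int)) : List (List Int) :=
  let h := grid.length
  let w := (pvIdx1 grid 0).length          -- len(grid[0]); grid = [] raises IndexError (outside Pre_)
  if w = 2 * h then
    let n := h
    let left := grid.map (fun row => row.take n)     -- row[:n]  (n ≥ 0, exact)
    let right := grid.map (fun row => row.drop n)    -- row[n:]
    if left.any (fun row => row.contains 8) then pvALoops left right n
    else pvALoops right left n
  else if h = 2 * w then
    let n := w
    let top := (List.range n).map (fun i => pvIdx1 grid i)        -- [grid[i] for i in range(n)]
    let bottom := (List.range n).map (fun i => pvIdx1 grid (n + i)) -- [grid[i] for i in range(n, 2n)]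
    if top.any (fun row => row.contains 8) then pvALoops top bottom n
    else pvALoops bottom top n
  else []  -- Python raises ValueError here; excluded by Pre_transform

-- ===== PORT B =====
-- bits = [[1 if c == 8 else 0 for c in row[:n]] for row in mask]
def pvBits (mh : List (List Int)) (n : Nat) : List (List Int) :=
  mh.map (fun row => (row.take n).map (fun c => if c = 8 then (1 : Int) else 0))

-- per source row: scaled = one whole copy of bits scaled by each value; then the n block
-- rows are appended to out, each assembled by concatenating the di-th row of every copy
def pvBBuild (mh sh : List (List Int)) (n : Nat) : List (List Int) :=
  let bits := pvBits mh n
  sh.foldl (fun out srow =>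
    let scaled := (srow.take n).map (fun v => bits.map (fun brow => brow.map (fun b => v * b)))
    (List.range n).foldl (fun out di =>
      out ++ [scaled.foldl (fun row blk => row ++ blk.getD di []) []]) out) []

def transform_alt (grid : List (List Int)) : List (List Int) :=
  let h := grid.length
  let w := (pvIdx1 grid 0).length
  if w = 2 * h then
    let n := h
    let first := grid.map (fun row => row.take n)
    let second := grid.map (fun row => row.drop n)
    if first.any (fun row => row.contains 8) then pvBBuild first second n
    else pvBBuild second first n
  else if h = 2 * w then
    let n := w
    let first := grid.take n                  -- grid[:n]
    let second := (grid.drop n).take n        -- grid[n:2*n]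
    if first.any (fun row => row.contains 8) then pvBBuild first second n
    else pvBBuild second first n
  else []  -- Python raises ValueError here; excluded by Pre_transform

-- ===== PRECONDITION & SPEC =====
-- Exactly the inputs where the Python A returns: nonempty grid, shape w = 2h or h = 2w
-- (else ValueError), and every row at least w long (a shorter row gives IndexError on the
-- in-range indexing of the halves; rows longer than w are read only on their first w entries).
def Pre_transform (grid : List (List Int)) : Prop :=
  grid ≠ [] ∧
  ((grid.headD []).length = 2 * grid.length ∨ grid.length = 2 * (grid.headD []).length) ∧
  ∀ row ∈ grid, (grid.headD []).length ≤ row.length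
instance (grid : List (List Int)) : Decidable (Pre_transform grid) := by
  unfold Pre_transform; infer_instance

def pvWitness_transform : List (List Int) := [[8, 0], [0, 8], [1, 2], [3, 4]]

def Spec_transform (grid : List (List Int)) (out : List (List Int)) : Prop := out = transform_alt grid
instance (grid : List (List Int)) (out : List (List Int)) : Decidable (Spec_transform grid out) := by
  unfold Spec_transform; infer_instance

-- ===== CLAIM (what is proved, stated in full; the proofs are below) =====
def Claim_equal_transform : Prop :=
  ∀ (grid : List (List Int)), Dom_transform grid → Pre_transform grid → Spec_transform grid (transform grid)

-- ===== LEMMAS AND PROOFS =====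

-- one scatter write out[r][c] = v
def pvStep (out : List (List Int)) (wr : Nat × Nat × Int) : List (List Int) :=
  out.modify wr.1 (fun row => row.set wr.2.1 wr.2.2)

-- A's quadruple loop as a fold over the flat list of its writes
def pvWrites (mh sh : List (List Int)) (n : Nat) : List (Nat × Nat × Int) :=
  (List.range n).flatMap (fun i => (List.range n).flatMap (fun j =>
    if pvIdx2 sh i j = 0 then []
    else
      (List.range n).flatMap (fun di => (List.range n).flatMap (fun dj =>
        if pvIdx2 (pvMask mh n) di dj ≠ 0 then [(i * n + di, j * n + dj, pvIdx2 sh i j)]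
        else []))))

theorem pvALoops_eq_foldl (mh sh : List (List Int)) (n : Nat) :
    pvALoops mh sh n =
      (pvWrites mh sh n).foldl pvStep
        ((List.range (n * n)).map (fun _ => (List.range (n * n)).map (fun _ => (0 : Int)))) := by
  unfold pvALoops pvWrites
  rw [List.foldl_flatMap]
  refine List.foldl_ext _ _ _ ?_
  intro out i _
  rw [List.foldl_flatMap]
  refine List.foldl_ext _ _ _ ?_
  intro out j _
  by_cases h0 : pvIdx2 sh i j = 0
  · simp [h0]
  · simp only [h0, if_false]
    rw [List.foldl_flatMap]
    refine List.foldl_ext _ _ _ ?_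
    intro out di _
    rw [List.foldl_flatMap]
    refine List.foldl_ext _ _ _ ?_
    intro out dj _
    by_cases hm : pvIdx2 (pvMask mh n) di dj ≠ 0
    · simp [hm, pvStep]
    · simp [hm]

theorem pvStep_cell_ne (out : List (List Int)) (wr : Nat × Nat × Int) (r c : Nat)
    (h : wr.1 ≠ r ∨ wr.2.1 ≠ c) : pvIdx2 (pvStep out wr) r c = pvIdx2 out r c := by
  simp only [pvIdx2, pvStep, List.getD_eq_getElem?_getD, List.getElem?_modify]
  rcases h with h | h
  · simp [h]
  · by_cases hr : wr.1 = r
    · subst hr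
      cases hx : out[wr.1]? with
      | none => simp
      | some row => simp [h]
    · simp [hr]

theorem pvStep_cell_eq (out : List (List Int)) (r c : Nat) (v : Int)
    (hr : r < out.length) (hc : c < (out.getD r []).length) :
    pvIdx2 (pvStep out (r, c, v)) r c = v := by
  obtain ⟨row, hx, hrow⟩ : ∃ row, out[r]? = some row ∧ row = out.getD r [] := by
    refine ⟨out.getD r [], ?_, rfl⟩
    rw [List.getD_eq_getElem?_getD, List.getElem?_eq_getElem hr]; rfl
  rw [← hrow] at hc
  have h1 : (pvStep out (r, c, v)).getD r [] = row.set c v := by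
    rw [List.getD_eq_getElem?_getD]
    simp [pvStep, hx]
  rw [pvIdx2, h1, List.getD_eq_getElem?_getD, List.getElem?_set, if_pos rfl, if_pos hc]
  rfl

theorem pv_foldl_length (L : List (Nat × Nat × Int)) (out : List (List Int)) :
    (L.foldl pvStep out).length = out.length := by
  induction L generalizing out with
  | nil => rfl
  | cons wr L ih => simp [List.foldl_cons, ih, pvStep]

theorem pv_mem_modify {α : Type} (l : List α) (i : Nat) (f : α → α) (a : α)
    (h : a ∈ l.modify i f) : a ∈ l ∨ ∃ b ∈ l, a = f b := by
  induction l generalizing i with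
  | nil => simp [List.modify_nil] at h
  | cons x l ih =>
    cases i with
    | zero =>
      rw [List.modify_zero_cons] at h
      rcases List.mem_cons.mp h with h | h
      · exact Or.inr ⟨x, by simp, h⟩
      · exact Or.inl (List.mem_cons_of_mem _ h)
    | succ i =>
      rw [List.modify_succ_cons] at h
      rcases List.mem_cons.mp h with h | h
      · exact Or.inl (by simp [h])
      · rcases ih i h with h | ⟨b, hb, hab⟩
        · exact Or.inl (List.mem_cons_of_mem _ h)
        · exact Or.inr ⟨b, List.mem_cons_of_mem _ hb, hab⟩

theorem pv_foldl_rows (L : List (Nat × Nat × Int)) (out : List (List Int)) (m : Nat)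
    (h : ∀ row ∈ out, row.length = m) : ∀ row ∈ L.foldl pvStep out, row.length = m := by
  induction L generalizing out with
  | nil => exact h
  | cons wr L ih =>
    rw [List.foldl_cons]
    refine ih _ ?_
    intro row hrow
    rcases pv_mem_modify _ _ _ _ hrow with hrow | ⟨b, hb, hrb⟩
    · exact h row hrow
    · rw [hrb, List.length_set]; exact h b hb

theorem pv_cell_nowrite (L : List (Nat × Nat × Int)) (out : List (List Int)) (r c : Nat)
    (h : ∀ wr ∈ L, wr.1 ≠ r ∨ wr.2.1 ≠ c) :
    pvIdx2 (L.foldl pvStep out) r c = pvIdx2 out r c := by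
  induction L generalizing out with
  | nil => rfl
  | cons wr L ih =>
    rw [List.foldl_cons, ih _ (fun w hw => h w (List.mem_cons_of_mem _ hw))]
    exact pvStep_cell_ne out wr r c (h wr (List.mem_cons_self))

theorem pv_cell_write (L : List (Nat × Nat × Int)) (out : List (List Int)) (r c : Nat) (v : Int)
    (m : Nat) (hr : r < out.length) (hc : c < m) (hrows : ∀ row ∈ out, row.length = m)
    (hmem : pvIdx2 out r c = v ∨ (r, c, v) ∈ L)
    (hval : ∀ wr ∈ L, wr.1 = r → wr.2.1 = c → wr.2.2 = v) :
    pvIdx2 (L.foldl pvStep out) r c = v := by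
  induction L generalizing out with
  | nil => simpa using hmem
  | cons wr L ih =>
    rw [List.foldl_cons]
    have hr' : r < (pvStep out wr).length := by simpa [pvStep] using hr
    have hrows' : ∀ row ∈ pvStep out wr, row.length = m := by
      intro row hrow
      rcases pv_mem_modify _ _ _ _ hrow with hrow | ⟨b, hb, hrb⟩
      · exact hrows row hrow
      · rw [hrb, List.length_set]; exact hrows b hb
    refine ih (pvStep out wr) hr' hrows' ?_ (fun w hw => hval w (List.mem_cons_of_mem _ hw))
    by_cases ht : wr.1 = r ∧ wr.2.1 = c
    · left
      have hv : wr.2.2 = v := hval wr List.mem_cons_self ht.1 ht.2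
      have : wr = (r, c, v) := by
        rcases wr with ⟨a, b, w⟩
        simp only at ht hv
        simp [ht.1, ht.2, hv]
      rw [this]
      refine pvStep_cell_eq out r c v hr ?_
      rw [hrows (out.getD r []) ?_]
      · exact hc
      · rw [List.getD_eq_getElem?_getD, List.getElem?_eq_getElem hr]
        exact List.getElem_mem _
    · have ht' : wr.1 ≠ r ∨ wr.2.1 ≠ c := by tauto
      rw [pvStep_cell_ne out wr r c ht']
      rcases hmem with hmem | hmem
      · exact Or.inl hmem
      · rcases List.mem_cons.mp hmem with hmem | hmem
        · exfalso; rw [← hmem] at ht'; simp at ht'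
        · exact Or.inr hmem

-- entries of the computed 0/1 mask
theorem pvMask_entry (mh : List (List Int)) (n di dj : Nat) (hdi : di < n) (hdj : dj < n) :
    pvIdx2 (pvMask mh n) di dj = if pvIdx2 mh di dj = 8 then 1 else 0 := by
  simp [pvIdx2, pvMask, List.getD_eq_getElem?_getD, hdi, hdj]

theorem pv_block_div (n i di : Nat) (hdi : di < n) : (i * n + di) / n = i ∧ (i * n + di) % n = di := by
  have hn : 0 < n := by omega
  constructor
  · rw [Nat.add_comm, Nat.add_mul_div_right _ _ hn, Nat.div_eq_of_lt hdi, Nat.zero_add]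
  · rw [Nat.add_comm, Nat.add_mul_mod_self_right, Nat.mod_eq_of_lt hdi]

theorem pv_mem_writes (mh sh : List (List Int)) (n : Nat) (wr : Nat × Nat × Int) :
    wr ∈ pvWrites mh sh n ↔
      ∃ i di j dj, i < n ∧ di < n ∧ j < n ∧ dj < n ∧ pvIdx2 sh i j ≠ 0 ∧
        pvIdx2 (pvMask mh n) di dj ≠ 0 ∧ wr = (i * n + di, j * n + dj, pvIdx2 sh i j) := by
  simp only [pvWrites, List.mem_flatMap, List.mem_range]
  constructor
  · rintro ⟨i, hi, j, hj, hwr⟩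
    by_cases h0 : pvIdx2 sh i j = 0
    · rw [if_pos h0] at hwr
      exact absurd hwr (by simp)
    · simp only [h0, if_false, List.mem_flatMap, List.mem_range] at hwr
      rcases hwr with ⟨di, hdi, dj, hdj, hwr⟩
      by_cases hm : pvIdx2 (pvMask mh n) di dj ≠ 0
      · rw [if_pos hm] at hwr
        exact ⟨i, di, j, dj, hi, hdi, hj, hdj, h0, hm, List.mem_singleton.mp hwr⟩
      · rw [if_neg hm] at hwr
        exact absurd hwr (by simp)
  · rintro ⟨i, di, j, dj, hi, hdi, hj, hdj, h0, hm, hwr⟩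
    refine ⟨i, hi, j, hj, ?_⟩
    rw [if_neg h0]
    simp only [List.mem_flatMap, List.mem_range]
    refine ⟨di, hdi, dj, hdj, ?_⟩
    rw [if_pos hm]
    simp [hwr]

theorem pvALoops_length (mh sh : List (List Int)) (n : Nat) :
    (pvALoops mh sh n).length = n * n := by
  rw [pvALoops_eq_foldl, pv_foldl_length]; simp

theorem pvALoops_rows (mh sh : List (List Int)) (n : Nat) :
    ∀ row ∈ pvALoops mh sh n, row.length = n * n := by
  rw [pvALoops_eq_foldl]
  exact pv_foldl_rows _ _ _ (by simp)

-- the cell-level characterisation of A's scatter-write loop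
theorem pvALoops_cell (mh sh : List (List Int)) (n r c : Nat) (hr : r < n * n) (hc : c < n * n) :
    pvIdx2 (pvALoops mh sh n) r c =
      if pvIdx2 mh (r % n) (c % n) = 8 then pvIdx2 sh (r / n) (c / n) else 0 := by
  have hn : 0 < n := by
    rcases Nat.eq_zero_or_pos n with h | h
    · subst h; simp at hr
    · exact h
  have hrn : r % n < n := Nat.mod_lt _ hn
  have hcn : c % n < n := Nat.mod_lt _ hn
  have hrd : r / n < n := Nat.div_lt_of_lt_mul hr
  have hcd : c / n < n := Nat.div_lt_of_lt_mul hc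
  rw [pvALoops_eq_foldl]
  have hout0len : ((List.range (n * n)).map
      (fun _ => (List.range (n * n)).map (fun _ => (0 : Int)))).length = n * n := by simp
  have hout0rows : ∀ row ∈ (List.range (n * n)).map
      (fun _ => (List.range (n * n)).map (fun _ => (0 : Int))), row.length = n * n := by simp
  have hcell0 : pvIdx2 ((List.range (n * n)).map
      (fun _ => (List.range (n * n)).map (fun _ => (0 : Int)))) r c = 0 := by
    simp [pvIdx2, List.getD_eq_getElem?_getD, hr, hc]
  have hdecomp : ∀ wr ∈ pvWrites mh sh n, wr.1 = r → wr.2.1 = c →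
      wr.2.2 = pvIdx2 sh (r / n) (c / n) ∧ pvIdx2 sh (r / n) (c / n) ≠ 0 ∧
        pvIdx2 (pvMask mh n) (r % n) (c % n) ≠ 0 := by
    intro wr hwr h1 h2
    rcases (pv_mem_writes mh sh n wr).mp hwr with ⟨i, di, j, dj, hi, hdi, hj, hdj, h0, hm, hwr'⟩
    subst hwr'
    simp only at h1 h2
    have hdi' := pv_block_div n i di hdi
    have hdj' := pv_block_div n j dj hdj
    have e1 : r / n = i := by rw [← h1, hdi'.1]
    have e2 : r % n = di := by rw [← h1, hdi'.2]
    have e3 : c / n = j := by rw [← h2, hdj'.1]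
    have e4 : c % n = dj := by rw [← h2, hdj'.2]
    rw [e1, e2, e3, e4]
    exact ⟨rfl, h0, hm⟩
  by_cases h8 : pvIdx2 mh (r % n) (c % n) = 8
  · simp only [h8, if_true]
    by_cases hv0 : pvIdx2 sh (r / n) (c / n) = 0
    · rw [hv0]
      rw [pv_cell_nowrite _ _ _ _ ?_]
      · exact hcell0
      · intro wr hwr
        by_contra hcon
        push Not at hcon
        exact (hdecomp wr hwr hcon.1 hcon.2).2.1 hv0
    · refine pv_cell_write _ _ r c _ (n * n) (by rw [hout0len]; exact hr) hc hout0rows ?_ ?_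
      · right
        rw [pv_mem_writes]
        refine ⟨r / n, r % n, c / n, c % n, hrd, hrn, hcd, hcn, hv0, ?_, ?_⟩
        · rw [pvMask_entry mh n _ _ hrn hcn, h8]; norm_num
        · rw [Nat.div_add_mod', Nat.div_add_mod']
      · intro wr hwr h1 h2
        exact (hdecomp wr hwr h1 h2).1
  · simp only [h8, if_false]
    rw [pv_cell_nowrite _ _ _ _ ?_]
    · exact hcell0
    · intro wr hwr
      by_contra hcon
      push Not at hcon
      have := (hdecomp wr hwr hcon.1 hcon.2).2.2
      rw [pvMask_entry mh n _ _ hrn hcn, if_neg h8] at this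
      exact this rfl

-- flatMap-of-map over ranges is a single map over range (m*n) with div/mod indexing
theorem pv_flatMap_range {α : Type} (m n : Nat) (g : Nat → Nat → α) :
    (List.range m).flatMap (fun i => (List.range n).map (g i)) =
      (List.range (m * n)).map (fun k => g (k / n) (k % n)) := by
  induction m with
  | zero => simp
  | succ m ih =>
    rw [List.range_succ, List.flatMap_append, ih, Nat.succ_mul, List.range_add, List.map_append]
    congr 1
    · simp only [List.flatMap_cons, List.flatMap_nil, List.append_nil]
      rw [List.map_map]
      refine List.map_congr_left ?_
      intro j hj
      rw [List.mem_range] at hj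
      have hn : 0 < n := by omega
      simp only [Function.comp_apply]
      rw [Nat.add_comm (m * n) j, Nat.add_mul_div_right _ _ hn, Nat.div_eq_of_lt hj,
        Nat.zero_add, Nat.add_mul_mod_self_right, Nat.mod_eq_of_lt hj]

-- a list of length n is the range-n map of its getD entries
theorem pv_eq_range_map {α : Type} (d : α) (l : List α) (n : Nat) (h : l.length = n) :
    l = (List.range n).map (fun i => l.getD i d) := by
  apply List.ext_getElem
  · simp [h]
  · intro i h1 h2
    rw [List.getElem_map, List.getElem_range, List.getD_eq_getElem?_getD,
      List.getElem?_eq_getElem h1]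
    rfl

theorem pv_take_range_map {α : Type} (d : α) (l : List α) (n : Nat) (h : n ≤ l.length) :
    l.take n = (List.range n).map (fun i => l.getD i d) := by
  refine (pv_eq_range_map d (l.take n) n (by simp [h])).trans ?_
  refine List.map_congr_left ?_
  intro i hi
  rw [List.mem_range] at hi
  rw [List.getD_eq_getElem?_getD, List.getD_eq_getElem?_getD, List.getElem?_take_of_lt hi]

-- bits rows under the length hypotheses
theorem pvBits_getD (mh : List (List Int)) (n di : Nat) (hdi : di < n) (hmlen : mh.length = n)
    (hmrow : ∀ row ∈ mh, n ≤ row.length) :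
    (pvBits mh n).getD di [] =
      (List.range n).map (fun dj => if pvIdx2 mh di dj = 8 then (1 : Int) else 0) := by
  have hdi' : di < mh.length := by omega
  rw [pvBits, List.getD_eq_getElem?_getD, List.getElem?_map, List.getElem?_eq_getElem hdi']
  simp only [Option.map_some, Option.getD_some]
  rw [pv_take_range_map 0 mh[di] n (hmrow _ (List.getElem_mem hdi')), List.map_map]
  refine List.map_congr_left ?_
  intro dj _
  have hx : mh.getD di [] = mh[di] := by
    rw [List.getD_eq_getElem?_getD, List.getElem?_eq_getElem hdi']; rfl
  simp only [Function.comp_apply, pvIdx2, hx]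

-- B's build rewritten as a flat list of rows over index ranges
theorem pvBBuild_eq (mh sh : List (List Int)) (n : Nat) (hmlen : mh.length = n)
    (hslen : sh.length = n) (hmrow : ∀ row ∈ mh, n ≤ row.length)
    (hsrow : ∀ row ∈ sh, n ≤ row.length) :
    pvBBuild mh sh n =
      (List.range n).flatMap (fun i => (List.range n).map (fun di =>
        (List.range n).flatMap (fun j => (List.range n).map (fun dj =>
          pvIdx2 sh i j * (if pvIdx2 mh di dj = 8 then (1 : Int) else 0))))) := by
  unfold pvBBuild
  have h1 : ∀ (acc : List (List Int)) (srow : List Int),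
      (List.range n).foldl (fun out di =>
        out ++ [((srow.take n).map (fun v => (pvBits mh n).map (fun brow => brow.map (fun b => v * b)))).foldl
          (fun row blk => row ++ blk.getD di []) []]) acc =
      acc ++ (List.range n).map (fun di =>
        ((srow.take n).map (fun v => (pvBits mh n).map (fun brow => brow.map (fun b => v * b)))).foldl
          (fun row blk => row ++ blk.getD di []) []) := by
    intro acc srow
    exact PySem.List.foldl_append_singleton_eq_map _ _ _
  calc sh.foldl (fun out srow =>
        (List.range n).foldl (fun out di =>
          out ++ [((srow.take n).map (fun v => (pvBits mh n).map (fun brow => brow.map (fun b => v * b)))).foldl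
            (fun row blk => row ++ blk.getD di []) []]) out) []
      = sh.foldl (fun out srow => out ++ (List.range n).map (fun di =>
          ((srow.take n).map (fun v => (pvBits mh n).map (fun brow => brow.map (fun b => v * b)))).foldl
            (fun row blk => row ++ blk.getD di []) [])) [] := by
        refine List.foldl_ext _ _ _ ?_
        intro acc srow _
        exact h1 acc srow
    _ = sh.flatMap (fun srow => (List.range n).map (fun di =>
          ((srow.take n).map (fun v => (pvBits mh n).map (fun brow => brow.map (fun b => v * b)))).foldl
            (fun row blk => row ++ blk.getD di []) [])) := by
        rw [PySem.List.foldl_append_eq_flatMap]; rfl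
    _ = _ := by
        rw [pv_eq_range_map [] sh n hslen, List.flatMap_map]
        refine List.flatMap_congr ?_
        intro i hi
        refine List.map_congr_left ?_
        intro di hdi
        rw [List.mem_range] at hdi
        have hsr : n ≤ (sh.getD i []).length := by
          rw [List.mem_range] at hi
          have hi' : i < sh.length := by omega
          have := hsrow (sh[i]) (List.getElem_mem hi')
          rwa [List.getD_eq_getElem?_getD, List.getElem?_eq_getElem hi']
        rw [PySem.List.foldl_append_eq_flatMap, List.nil_append,
          pv_take_range_map 0 (sh.getD i []) n hsr, List.map_map, List.flatMap_map]
        refine List.flatMap_congr ?_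
        intro j _
        simp only [Function.comp_apply]
        have hb : (pvBits mh n).length = n := by simp [pvBits, hmlen]
        have hdib : di < (pvBits mh n).length := by omega
        rw [List.getD_eq_getElem?_getD, List.getElem?_map, List.getElem?_eq_getElem hdib]
        simp only [Option.map_some, Option.getD_some]
        have : (pvBits mh n)[di] = (pvBits mh n).getD di [] := by
          rw [List.getD_eq_getElem?_getD, List.getElem?_eq_getElem hdib]; rfl
        rw [this, pvBits_getD mh n di hdi hmlen hmrow, List.map_map]
        refine List.map_congr_left ?_
        intro dj _
        have hi' : i < n := List.mem_range.mp hi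
        have hx : pvIdx2 ((List.range n).map (fun i => sh.getD i [])) i j = (sh.getD i []).getD j 0 := by
          simp [pvIdx2, List.getD_eq_getElem?_getD, hi']
        rw [Function.comp_apply, hx]

-- THE CORE: A's mutated matrix equals B's stitched scaled mask copies
theorem pv_core (mh sh : List (List Int)) (n : Nat) (hmlen : mh.length = n)
    (hslen : sh.length = n) (hmrow : ∀ row ∈ mh, n ≤ row.length)
    (hsrow : ∀ row ∈ sh, n ≤ row.length) :
    pvALoops mh sh n = pvBBuild mh sh n := by
  rw [pvBBuild_eq mh sh n hmlen hslen hmrow hsrow]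
  rw [pv_flatMap_range n n]
  apply List.ext_getElem
  · rw [pvALoops_length]; simp
  · intro r h1 h2
    simp only [List.length_map, List.length_range] at h2
    rw [List.getElem_map, List.getElem_range, pv_flatMap_range n n]
    have hrowlen : (pvALoops mh sh n)[r].length = n * n :=
      pvALoops_rows mh sh n _ (List.getElem_mem h1)
    apply List.ext_getElem
    · rw [hrowlen]; simp
    · intro c hc1 hc2
      simp only [List.length_map, List.length_range] at hc2
      rw [List.getElem_map, List.getElem_range]
      have : pvIdx2 (pvALoops mh sh n) r c = (pvALoops mh sh n)[r][c] := by
        rw [pvIdx2, List.getD_eq_getElem _ _ h1, List.getD_eq_getElem _ _ hc1]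
      rw [← this, pvALoops_cell mh sh n r c h2 hc2]
      by_cases h8 : pvIdx2 mh (r % n) (c % n) = 8
      · simp [h8]
      · simp [h8]

theorem pv_take_eq (g : List (List Int)) (n : Nat) (h : n ≤ g.length) :
    (List.range n).map (fun i => pvIdx1 g i) = g.take n := by
  apply List.ext_getElem
  · simp [Nat.min_eq_left h]
  · intro i h1 h2
    simp only [List.length_map, List.length_range] at h1
    rw [List.getElem_map, List.getElem_range, List.getElem_take]
    rw [pvIdx1, List.getD_eq_getElem?_getD, List.getElem?_eq_getElem (Nat.lt_of_lt_of_le h1 h)]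
    rfl

theorem pv_drop_eq (g : List (List Int)) (n : Nat) (h : g.length = 2 * n) :
    (List.range n).map (fun i => pvIdx1 g (n + i)) = (g.drop n).take n := by
  apply List.ext_getElem
  · simp [h]; omega
  · intro i h1 h2
    simp only [List.length_map, List.length_range] at h1
    rw [List.getElem_map, List.getElem_range, List.getElem_take, List.getElem_drop]
    rw [pvIdx1, List.getD_eq_getElem?_getD, List.getElem?_eq_getElem (by omega)]
    rfl

-- ===== VERDICT (by name: the statement is the Claim_ definition above) =====
theorem transform_spec : Claim_equal_transform := by
  intro grid _ hpre
  obtain ⟨hne, _, hrows⟩ := hpre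
  have hhead : pvIdx1 grid 0 = grid.headD [] := by
    cases grid with
    | nil => exact absurd rfl hne
    | cons a l => rfl
  unfold Spec_transform transform transform_alt
  by_cases hw : (pvIdx1 grid 0).length = 2 * grid.length
  · -- horizontal split: n = grid.length
    set n := grid.length with hn
    have hleftlen : (grid.map (fun row => row.take n)).length = n := by
      rw [List.length_map]
    have hrightlen : (grid.map (fun row => row.drop n)).length = n := by
      rw [List.length_map]
    have hleftrow : ∀ row ∈ grid.map (fun row => row.take n), n ≤ row.length := by
      intro row hrow
      rcases List.mem_map.mp hrow with ⟨r, hr, hrr⟩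
      have := hrows r hr
      rw [← hhead, hw] at this
      rw [← hrr]
      simp; omega
    have hrightrow : ∀ row ∈ grid.map (fun row => row.drop n), n ≤ row.length := by
      intro row hrow
      rcases List.mem_map.mp hrow with ⟨r, hr, hrr⟩
      have := hrows r hr
      rw [← hhead, hw] at this
      rw [← hrr]
      simp; omega
    simp only [if_pos hw]
    by_cases h8 : (grid.map (fun row => row.take n)).any (fun row => row.contains 8)
    · simp only [if_pos h8]
      exact pv_core _ _ n hleftlen hrightlen hleftrow hrightrow
    · simp only [if_neg h8]
      exact pv_core _ _ n hrightlen hleftlen hrightrow hleftrow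
  · by_cases hh : grid.length = 2 * (pvIdx1 grid 0).length
    · -- vertical split: n = (pvIdx1 grid 0).length
      set n := (pvIdx1 grid 0).length with hn
      have htop := pv_take_eq grid n (by omega)
      have hbot := pv_drop_eq grid n hh
      have htoplen : (grid.take n).length = n := by
        rw [List.length_take]; omega
      have hbotlen : ((grid.drop n).take n).length = n := by
        rw [List.length_take, List.length_drop]; omega
      have htoprow : ∀ row ∈ grid.take n, n ≤ row.length := by
        intro row hrow
        have := hrows row (List.mem_of_mem_take hrow)
        rw [← hhead] at this
        omega
      have hbotrow : ∀ row ∈ (grid.drop n).take n, n ≤ row.length := by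
        intro row hrow
        have := hrows row (List.mem_of_mem_drop (List.mem_of_mem_take hrow))
        rw [← hhead] at this
        omega
      simp only [if_neg hw, if_pos hh]
      rw [htop, hbot]
      by_cases h8 : (grid.take n).any (fun row => row.contains 8)
      · simp only [if_pos h8]
        exact pv_core _ _ n htoplen hbotlen htoprow hbotrow
      · simp only [if_neg h8]
        exact pv_core _ _ n hbotlen htoplen hbotrow htoprow
    · simp [hw, hh]
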